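-- pv_equiv track=rewrite | github.com/zeppeki/project-euler-first100 | problems/problem_095.py | find_all_amicable_chains
-- ===== SOURCE A (Python) =====
-- def compute_divisor_sums(limit: int) -> list[int]:
--     """
--     1からlimitまでの全ての数について、真の約数の和を計算
--     時間計算量: O(n * log n)
--     空間計算量: O(n)
--     """
--     divisor_sums = [0] * (limit + 1)
--
--     # Use sieve-like approach
--     for i in range(1, limit // 2 + 1):
--         for j in range(2 * i, limit + 1, i):
--             divisor_sums[j] += i
--
--     return divisor_sums
--
-- def find_chain_length(
--     start: int, divisor_sums: list[int], limit: int
-- ) -> tuple[int, list[int]]: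
--     """
--     与えられた数から始まる連鎖の長さと連鎖を返す
--     時間計算量: O(k) where k is chain length
--     空間計算量: O(k)
--     """
--     chain = [start]
--     seen = {start}
--     current = start
--
--     while True:
--         # Get next number in chain
--         if current >= len(divisor_sums):
--             return 0, []
--
--         next_num = divisor_sums[current]
--
--         # Check various termination conditions
--         if next_num > limit:
--             # Chain element exceeds limit
--             return 0, []
--
--         if next_num == 0 or next_num == 1:
--             # Chain terminates at 0 or 1
--             return 0, []
--
--         if next_num == start:
--             # Found an amicable chain
--             return len(chain), chain
--
--         if next_num < start:
--             # We should have seen this chain before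
--             return 0, []
--
--         if next_num in seen:
--             # Found a loop that doesn't include start
--             return 0, []
--
--         chain.append(next_num)
--         seen.add(next_num)
--         current = next_num
--
-- def find_all_amicable_chains(limit: int = 1000000) -> list[tuple[int, list[int]]]:
--     """
--     指定された制限内のすべての友愛連鎖を見つける
--     時間計算量: O(n * log n)
--     空間計算量: O(n)
--     """
--     divisor_sums = compute_divisor_sums(limit)
--     chains = []
--     seen = set()
--
--     for i in range(2, limit + 1):
--         if i in seen:
--             continue
--
--         chain_length, chain = find_chain_length(i, divisor_sums, limit)
--
--         if chain_length > 0: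
--             chains.append((chain_length, chain))
--             seen.update(chain)
--
--     return sorted(chains, key=lambda x: (-x[0], min(x[1])))
-- ===== SOURCE B (Python) =====
-- def compute_divisor_sums(limit: int) -> list[int]:
--     """Sieve of proper-divisor sums (unchanged from A)."""
--     divisor_sums = [0] * (limit + 1)
--     for i in range(1, limit // 2 + 1):
--         for j in range(2 * i, limit + 1, i):
--             divisor_sums[j] += i
--     return divisor_sums
--
--
-- def _cycle_length(i: int, s: list[int], limit: int) -> int:
--     """Length of the aliquot cycle through i if i is its smallest element, else 0.
--
--     Constant-memory walk: no path list, no seen set.  A successful cycle has at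
--     most limit + 1 distinct elements, so the step budget limit + 1 is enough to
--     find every cycle; walks that neither return to i nor leave (i, limit] are
--     dead ends and report 0 when the budget runs out.
--     """
--     cur = i
--     for n in range(1, limit + 2):
--         cur = s[cur]
--         if cur == i:
--             return n
--         if not (i < cur <= limit):
--             return 0
--     return 0
--
--
-- def find_all_amicable_chains(limit: int = 1000000) -> list[tuple[int, list[int]]]:
--     s = compute_divisor_sums(limit)
--     chains = []
--     for i in range(2, limit + 1):
--         n = _cycle_length(i, s, limit)
--         if n > 0:
--             chain = []
--             cur = i
--             for _ in range(n):
--                 chain.append(cur)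
--                 cur = s[cur]
--             chains.append((n, chain))
--     return sorted(chains, key=lambda x: (-x[0], min(x[1])))
-- ===== Notes on version B (the rewrite author's own statement) =====
-- stated objective: simpler
-- what changed: A traces each start with a growing path list plus a per-walk seen set and skips members of previously found chains via a global seen set; B keeps the sieve but replaces all of that with a constant-memory counting walk run for every start (a bounded successor walk tracking only the current value and a step counter), rebuilding the chain only for actual cycle roots, and drops every set.
import Mathlib
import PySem

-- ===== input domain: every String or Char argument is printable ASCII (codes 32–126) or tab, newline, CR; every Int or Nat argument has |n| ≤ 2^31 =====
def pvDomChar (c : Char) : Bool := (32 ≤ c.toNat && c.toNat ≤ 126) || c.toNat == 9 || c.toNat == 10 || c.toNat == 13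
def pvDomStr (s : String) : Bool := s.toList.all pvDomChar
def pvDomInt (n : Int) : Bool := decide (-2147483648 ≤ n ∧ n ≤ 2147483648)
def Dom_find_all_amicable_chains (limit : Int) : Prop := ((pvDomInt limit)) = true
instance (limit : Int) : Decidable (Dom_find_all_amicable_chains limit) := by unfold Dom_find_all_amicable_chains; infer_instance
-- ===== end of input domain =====

-- B replaces A's per-start path-list/seen-set tracing (plus a global 'seen' skip set) by a
-- constant-memory counting walk run for every start: first the cycle length is found, then the
-- chain is rebuilt only for actual cycles; objective: simpler (no sets, no path storage).

-- ===== PORT A =====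
-- Python-list indexing on an Array (the Python list divisor_sums is represented as Array Int so
-- the ports evaluate fast): exact for -len ≤ i < len (negative i reads from the end, as Python);
-- out of range Python raises IndexError — unreachable from the entries, the default is returned.
def pyAGet (a : Array Int) (i : Int) (d : Int) : Int :=
  if 0 ≤ i ∧ i < (a.size : Int) then a.getD i.toNat d
  else if -(a.size : Int) ≤ i ∧ i < 0 then a.getD (i + a.size).toNat d
  else d

def pyASet (a : Array Int) (i : Int) (v : Int) : Array Int :=
  if 0 ≤ i ∧ i < (a.size : Int) then a.setIfInBounds i.toNat v
  else if -(a.size : Int) ≤ i ∧ i < 0 then a.setIfInBounds (i + a.size).toNat v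
  else a

-- shared helper: compute_divisor_sums (identical sieve in A and B)
def computeDivisorSums (limit : Int) : Array Int :=
  (PySem.List.pyRange 1 (PySem.Int.floordiv limit 2 + 1)).foldl
    (fun ds i =>
      (PySem.List.pyRange (2 * i) (limit + 1) i).foldl
        (fun ds j => pyASet ds j (pyAGet ds j 0 + i)) ds)
    (Array.replicate (limit + 1).toNat (0 : Int))

-- A's 'while True' loop of find_chain_length; fuel (limit+2).toNat is a port artifact: the
-- lemmas below show it is never exhausted when a chain exists, and the fuel-out value (0, [])
-- coincides with the loop's failure returns elsewhere.
def findChainLengthLoop (s : Array Int) (limit start : Int) :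
    Nat → List Int → PySem.Set Int → Int → Int × List Int
  | 0, _chain, _seen, _current => (0, [])
  | fuel + 1, chain, seen, current =>
    if current ≥ (s.size : Int) then (0, [])   -- len(divisor_sums)
    else
      let next := pyAGet s current 0   -- divisor_sums[current]
      if next > limit then (0, [])
      else if next = 0 ∨ next = 1 then (0, [])
      else if next = start then (PySem.List.len chain, chain)
      else if next < start then (0, [])
      else if PySem.Set.contains seen next then (0, [])
      else findChainLengthLoop s limit start fuel (chain ++ [next]) (PySem.Set.add seen next) next

def findChainLength (start : Int) (s : Array Int) (limit : Int) : Int × List Int :=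
  findChainLengthLoop s limit start (limit + 2).toNat [start] (PySem.Set.ofList [start]) start

def outerBodyA (s : Array Int) (limit : Int)
    (st : List (Int × List Int) × PySem.Set Int) (i : Int) :
    List (Int × List Int) × PySem.Set Int :=
  if PySem.Set.contains st.2 i then st
  else
    let r := findChainLength i s limit
    if r.1 > 0 then (st.1 ++ [r], PySem.Set.update st.2 r.2) else st

def find_all_amicable_chains (limit : Int) : List (Int × List Int) :=
  let s := computeDivisorSums limit
  let st := (PySem.List.pyRange 2 (limit + 1)).foldl (outerBodyA s limit) ([], PySem.Set.empty)
  PySem.List.sorted2 st.1 (fun x => -x.1) (fun x => PySem.List.minD x.2 (fun y => y) 0)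

-- ===== PORT B =====
-- B's _cycle_length: 'for n in range(1, limit + 2)' runs (limit+1).toNat times; falling off the
-- loop returns 0 exactly as the Python does.
def cycleLengthLoop (s : Array Int) (limit i : Int) : Nat → Int → Int → Int
  | 0, _cur, _n => 0
  | k + 1, cur, n =>
    let cur' := pyAGet s cur 0   -- s[cur]
    if cur' = i then n
    else if i < cur' ∧ cur' ≤ limit then cycleLengthLoop s limit i k cur' (n + 1)
    else 0

def cycleLength (i : Int) (s : Array Int) (limit : Int) : Int :=
  cycleLengthLoop s limit i (limit + 1).toNat i 1

-- B's rebuild loop: for _ in range(n): chain.append(cur); cur = s[cur]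
def rebuildBody (s : Array Int) (st : List Int × Int) (_t : Int) : List Int × Int :=
  (st.1 ++ [st.2], pyAGet s st.2 0)

def rebuildChain (s : Array Int) (i n : Int) : List Int :=
  ((PySem.List.pyRange 0 n).foldl (rebuildBody s) ([], i)).1

def outerBodyB (s : Array Int) (limit : Int)
    (chains : List (Int × List Int)) (i : Int) : List (Int × List Int) :=
  let n := cycleLength i s limit
  if n > 0 then chains ++ [(n, rebuildChain s i n)] else chains

def find_all_amicable_chains_alt (limit : Int) : List (Int × List Int) :=
  let s := computeDivisorSums limit
  let chains := (PySem.List.pyRange 2 (limit + 1)).foldl (outerBodyB s limit) []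
  PySem.List.sorted2 chains (fun x => -x.1) (fun x => PySem.List.minD x.2 (fun y => y) 0)

-- ===== PRECONDITION & SPEC =====
def Spec_find_all_amicable_chains (limit : Int) (out : List (Int × List Int)) : Prop := out = find_all_amicable_chains_alt limit
instance (limit : Int) (out : List (Int × List Int)) : Decidable (Spec_find_all_amicable_chains limit out) := by unfold Spec_find_all_amicable_chains; infer_instance

-- ===== CLAIM (what is proved, stated in full; the proofs are below) =====
def Claim_equal_find_all_amicable_chains : Prop := ∀ (limit : Int), Dom_find_all_amicable_chains limit → Spec_find_all_amicable_chains limit (find_all_amicable_chains limit)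

-- ===== LEMMAS AND PROOFS =====

-- the aliquot successor read off the sieve, and its iterates
def aliq (s : Array Int) (x : Int) : Int := s.getD x.toNat 0

def it (s : Array Int) (i : Int) (j : Nat) : Int := (aliq s)^[j] i

-- i is the root of an aliquot cycle of length n lying inside (i, limit] past its root
def FirstRet (s : Array Int) (limit i : Int) (n : Nat) : Prop :=
  1 ≤ n ∧ it s i n = i ∧ ∀ j : Nat, 1 ≤ j → j < n → i < it s i j ∧ it s i j ≤ limit

theorem it_zero (s : Array Int) (i : Int) : it s i 0 = i := rfl

theorem it_succ (s : Array Int) (i : Int) (j : Nat) : it s i (j + 1) = aliq s (it s i j) :=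
  Function.iterate_succ_apply' (aliq s) j i

theorem pyGetD_aliq (s : Array Int) (limit x : Int) (hs : (s.size : Int) = limit + 1)
    (h0 : 0 ≤ x) (h1 : x ≤ limit) : pyAGet s x 0 = aliq s x := by
  unfold pyAGet aliq
  rw [if_pos ⟨h0, by omega⟩]

theorem firstRet_unique (s : Array Int) (limit i : Int) (n m : Nat)
    (hn : FirstRet s limit i n) (hm : FirstRet s limit i m) : n = m := by
  by_contra hne
  rcases Nat.lt_or_ge n m with h | h
  · have := (hm.2.2 n hn.1 h).1
    rw [hn.2.1] at this; omega
  · have hlt : m < n := by omega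
    have := (hn.2.2 m hm.1 hlt).1
    rw [hm.2.1] at this; omega

theorem it_ne (s : Array Int) (limit i : Int) (N : Nat) (hN : FirstRet s limit i N) 
    (a b : Nat) (hab : a < b) (hbN : b < N) : it s i a ≠ it s i b := by
  intro he
  rcases Nat.eq_zero_or_pos a with ha0 | hapos
  · subst ha0
    have := (hN.2.2 b (by omega) hbN).1
    rw [← he, it_zero] at this; omega
  · have hshift : it s i (N - b + a) = i := by
      have h1 : it s i (N - b + a) = (aliq s)^[N - b] (it s i a) :=
        Function.iterate_add_apply (aliq s) (N - b) a i
      have h2 : it s i (N - b + b) = (aliq s)^[N - b] (it s i b) :=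
        Function.iterate_add_apply (aliq s) (N - b) b i
      have hb : N - b + b = N := by omega
      rw [he] at h1
      rw [hb] at h2
      rw [h1, ← h2, hN.2.1]
    have hj1 : 1 ≤ N - b + a := by omega
    have hj2 : N - b + a < N := by omega
    have := (hN.2.2 (N - b + a) hj1 hj2).1
    rw [hshift] at this; omega

theorem firstRet_le (s : Array Int) (limit i : Int) (N : Nat) (_hi : 2 ≤ i) (hil : i ≤ limit)
    (hN : FirstRet s limit i N) : (N : Int) ≤ limit - i + 1 := by
  have hnd : ((List.range N).map (it s i)).Nodup := by
    refine List.Nodup.map_on ?_ (List.nodup_range)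
    intro x hx y hy he
    simp only [List.mem_range] at hx hy
    by_contra hne
    rcases Nat.lt_or_ge x y with h | h
    · exact it_ne s limit i N hN x y h hy he
    · exact it_ne s limit i N hN y x (by omega) hx he.symm
  have hsub : ((List.range N).map (it s i)).toFinset ⊆ Finset.Icc i limit := by
    intro x hx
    simp only [List.mem_toFinset, List.mem_map, List.mem_range] at hx
    obtain ⟨a, haN, hax⟩ := hx
    rcases Nat.eq_zero_or_pos a with ha0 | hapos
    · subst ha0; rw [it_zero] at hax; subst hax
      exact Finset.mem_Icc.mpr ⟨le_refl _, hil⟩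
    · have := hN.2.2 a (by omega) haN
      rw [hax] at this
      exact Finset.mem_Icc.mpr ⟨le_of_lt this.1, this.2⟩
  have hcard : ((List.range N).map (it s i)).toFinset.card ≤ (Finset.Icc i limit).card :=
    Finset.card_le_card hsub
  rw [List.toFinset_card_of_nodup hnd] at hcard
  simp only [List.length_map, List.length_range] at hcard
  rw [Int.card_Icc] at hcard
  omega

theorem it_period (s : Array Int) (i : Int) (P : Nat) (hp : it s i P = i) :
    ∀ (q r : Nat), it s i (q * P + r) = it s i r := by
  intro q
  induction q with
  | zero => intro r; simp
  | succ q ih =>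
    intro r
    have he : (q + 1) * P + r = P + (q * P + r) := by ring
    rw [he]
    have h1 : it s i (P + (q * P + r)) = (aliq s)^[q * P + r] (it s i P) := by
      rw [Nat.add_comm]
      exact Function.iterate_add_apply (aliq s) (q * P + r) P i
    rw [h1, hp]
    exact ih r

theorem not_firstRet_of_orbit (s : Array Int) (limit mm i : Int) (N a : Nat)
    (hN : FirstRet s limit mm N) (_ha1 : 1 ≤ a) (haN : a < N)
    (hi : i = it s mm a) (hlt : mm < i) : ∀ N', ¬ FirstRet s limit i N' := by
  intro N' h'
  have hm : it s i (N - a) = mm := by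
    have h1 : it s mm (N - a + a) = (aliq s)^[N - a] (it s mm a) :=
      Function.iterate_add_apply (aliq s) (N - a) a mm
    have hb : N - a + a = N := by omega
    rw [hb, hN.2.1] at h1
    unfold it
    rw [hi]
    unfold it
    exact h1.symm
  have h1a : 1 ≤ N - a := by omega
  rcases Nat.lt_or_ge (N - a) N' with hlt' | hge
  · have := (h'.2.2 (N - a) h1a hlt').1
    rw [hm] at this; omega
  · have hNp : 1 ≤ N' := h'.1
    have hper : it s i (N - a) = it s i ((N - a) % N') := by
      have := it_period s i N' h'.2.1 ((N - a) / N') ((N - a) % N')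
      rwa [Nat.mul_comm ((N - a) / N') N', Nat.div_add_mod] at this
    rcases Nat.eq_zero_or_pos ((N - a) % N') with h0 | hpos
    · rw [h0, it_zero] at hper
      rw [hper] at hm; omega
    · have hjlt : (N - a) % N' < N' := Nat.mod_lt _ (by omega)
      have := (h'.2.2 ((N - a) % N') hpos hjlt).1
      rw [← hper, hm] at this; omega

-- bounds on the current iterate during a walk
theorem it_bounds (s : Array Int) (limit i : Int) (c : Nat) (hi : 2 ≤ i) (hil : i ≤ limit)
    (hint : ∀ j : Nat, 1 ≤ j → j ≤ c → i < it s i j ∧ it s i j ≤ limit) :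
    2 ≤ it s i c ∧ it s i c ≤ limit := by
  rcases Nat.eq_zero_or_pos c with h0 | hpos
  · subst h0; rw [it_zero]; exact ⟨hi, hil⟩
  · have := hint c hpos (le_refl _)
    exact ⟨by omega, this.2⟩

-- ===== characterization of B's cycle-length loop =====

theorem bgo_found (s : Array Int) (limit i : Int) (N : Nat)
    (hs : (s.size : Int) = limit + 1) (hi : 2 ≤ i) (hil : i ≤ limit)
    (hN : FirstRet s limit i N) :
    ∀ (k : Nat), ∀ (c : Nat), ∀ (cur : Int), 1 ≤ c → c ≤ N → cur = it s i (c - 1) →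
      (∀ j : Nat, 1 ≤ j → j < c → i < it s i j ∧ it s i j ≤ limit) →
      N - c < k →
      cycleLengthLoop s limit i k cur (c : Int) = (N : Int) := by
  intro k
  induction k with
  | zero => intro c cur hc1 hcN hcur hint hk; omega
  | succ k ih =>
    intro c cur hc1 hcN hcur hint hk
    have hcb : 2 ≤ cur ∧ cur ≤ limit := by
      rw [hcur]
      exact it_bounds s limit i (c - 1) hi hil (fun j hj1 hj2 => hint j hj1 (by omega))
    have hget : pyAGet s cur 0 = it s i c := by
      rw [pyGetD_aliq s limit cur hs (by omega) hcb.2, hcur, ← it_succ]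
      congr 1; omega
    simp only [cycleLengthLoop, hget]
    rcases Nat.eq_or_lt_of_le hcN with hceq | hclt
    · subst hceq
      rw [if_pos (by rw [hN.2.1])]
    · have hne : it s i c ≠ i := by
        intro he
        have : FirstRet s limit i c := ⟨hc1, he, hint⟩
        have := firstRet_unique s limit i c N this hN
        omega
      have hbnd := hN.2.2 c hc1 hclt
      rw [if_neg hne, if_pos hbnd]
      have hcast : (c : Int) + 1 = ((c + 1 : Nat) : Int) := by push_cast; ring
      rw [hcast]
      exact ih (c + 1) (it s i c) (by omega) (by omega)
        (by rfl)
        (fun j hj1 hj2 => by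
          rcases Nat.lt_or_ge j c with h | h
          · exact hint j hj1 h
          · have : j = c := by omega
            subst this; exact hbnd)
        (by omega)

theorem bgo_none (s : Array Int) (limit i : Int)
    (hs : (s.size : Int) = limit + 1) (hi : 2 ≤ i) (hil : i ≤ limit)
    (hnone : ∀ N, ¬ FirstRet s limit i N) :
    ∀ (k : Nat), ∀ (c : Nat), ∀ (cur : Int), 1 ≤ c → cur = it s i (c - 1) →
      (∀ j : Nat, 1 ≤ j → j < c → i < it s i j ∧ it s i j ≤ limit) →
      cycleLengthLoop s limit i k cur (c : Int) = 0 := by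
  intro k
  induction k with
  | zero => intro c cur _ _ _; rfl
  | succ k ih =>
    intro c cur hc1 hcur hint
    have hcb : 2 ≤ cur ∧ cur ≤ limit := by
      rw [hcur]
      exact it_bounds s limit i (c - 1) hi hil (fun j hj1 hj2 => hint j hj1 (by omega))
    have hget : pyAGet s cur 0 = it s i c := by
      rw [pyGetD_aliq s limit cur hs (by omega) hcb.2, hcur, ← it_succ]
      congr 1; omega
    simp only [cycleLengthLoop, hget]
    have hne : it s i c ≠ i := by
      intro he
      exact hnone c ⟨hc1, he, hint⟩
    rw [if_neg hne]
    by_cases hb : i < it s i c ∧ it s i c ≤ limit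
    · rw [if_pos hb]
      have hcast : (c : Int) + 1 = ((c + 1 : Nat) : Int) := by push_cast; ring
      rw [hcast]
      exact ih (c + 1) (it s i c) (by omega)
        (by rfl)
        (fun j hj1 hj2 => by
          rcases Nat.lt_or_ge j c with h | h
          · exact hint j hj1 h
          · have : j = c := by omega
            subst this; exact hb)
    · rw [if_neg hb]

theorem cycleLength_of_firstRet (s : Array Int) (limit i : Int) (N : Nat)
    (hs : (s.size : Int) = limit + 1) (hi : 2 ≤ i) (hil : i ≤ limit)
    (hN : FirstRet s limit i N) : cycleLength i s limit = (N : Int) := by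
  unfold cycleLength
  have hle := firstRet_le s limit i N hi hil hN
  have h1 : ((1 : Nat) : Int) = (1 : Int) := by norm_num
  rw [← h1]
  exact bgo_found s limit i N hs hi hil hN ((limit + 1).toNat) 1 i (le_refl _)
    hN.1 (by rw [it_zero]) (fun j hj1 hj2 => by omega) (by omega)

theorem cycleLength_of_none (s : Array Int) (limit i : Int)
    (hs : (s.size : Int) = limit + 1) (hi : 2 ≤ i) (hil : i ≤ limit)
    (hnone : ∀ N, ¬ FirstRet s limit i N) : cycleLength i s limit = 0 := by
  unfold cycleLength
  have h1 : ((1 : Nat) : Int) = (1 : Int) := by norm_num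
  rw [← h1]
  exact bgo_none s limit i hs hi hil hnone ((limit + 1).toNat) 1 i (le_refl _)
    (by rw [it_zero]) (fun j hj1 hj2 => by omega)

-- ===== characterization of A's chain-tracing loop =====

theorem aloop_found (s : Array Int) (limit i : Int) (N : Nat)
    (hs : (s.size : Int) = limit + 1) (hi : 2 ≤ i) (hil : i ≤ limit)
    (hN : FirstRet s limit i N) :
    ∀ (fuel : Nat), ∀ (j : Nat), ∀ (chain : List Int), ∀ (seen : PySem.Set Int), ∀ (cur : Int),
      chain = (List.range (j + 1)).map (it s i) → seen = chain → cur = it s i j → j < N →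
      (∀ l : Nat, 1 ≤ l → l ≤ j → i < it s i l ∧ it s i l ≤ limit) →
      N - 1 - j < fuel →
      findChainLengthLoop s limit i fuel chain seen cur
        = ((N : Int), (List.range N).map (it s i)) := by
  intro fuel
  induction fuel with
  | zero => intro j chain seen cur _ _ _ hjN _ hf; omega
  | succ fuel ih =>
    intro j chain seen cur hchain hseen hcur hjN hint hf
    have hcb : 2 ≤ cur ∧ cur ≤ limit := by
      rw [hcur]; exact it_bounds s limit i j hi hil hint
    have hget : pyAGet s cur 0 = it s i (j + 1) := by
      rw [pyGetD_aliq s limit cur hs (by omega) hcb.2, hcur, ← it_succ]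
    simp only [findChainLengthLoop, hget]
    rw [if_neg (by omega)]
    by_cases hjeq : j + 1 = N
    · -- j + 1 = N : next = i, success
      rw [hjeq, hN.2.1]
      rw [if_neg (by omega), if_neg (by omega), if_pos rfl]
      simp only [Prod.mk.injEq]
      constructor
      · rw [hchain, PySem.List.len_eq]
        simp only [List.length_map, List.length_range]
        omega
      · rw [hchain, hjeq]
    · have hjlt : j + 1 < N := by omega
      have hbnd := hN.2.2 (j + 1) (by omega) hjlt
      have hnotin : it s i (j + 1) ∉ chain := by
        rw [hchain]
        intro hmem
        simp only [List.mem_map, List.mem_range] at hmem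
        obtain ⟨a, haj, hae⟩ := hmem
        exact it_ne s limit i N hN a (j + 1) (by omega) hjlt hae
      have hcontains : PySem.Set.contains seen (it s i (j + 1)) = false := by
        rw [hseen]
        by_contra h
        have : PySem.Set.contains chain (it s i (j + 1)) = true := by
          cases hx : PySem.Set.contains chain (it s i (j + 1))
          · exact absurd hx h
          · rfl
        exact hnotin ((PySem.Set.contains_iff chain _).mp this)
      rw [if_neg (by omega), if_neg (by omega), if_neg (by omega), if_neg (by omega),
        if_neg (by rw [hcontains]; exact Bool.false_ne_true)]
      have hadd : PySem.Set.add seen (it s i (j + 1)) = chain ++ [it s i (j + 1)] := by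
        rw [hseen] at hcontains ⊢
        simp only [PySem.Set.add, hcontains]
        simp
      rw [hadd]
      exact ih (j + 1) (chain ++ [it s i (j + 1)]) (chain ++ [it s i (j + 1)]) (it s i (j + 1))
        (by simp [hchain, List.range_succ]) rfl rfl hjlt
        (fun l hl1 hl2 => by
          rcases Nat.lt_or_ge l (j + 1) with h | h
          · exact hint l hl1 (by omega)
          · have : l = j + 1 := by omega
            subst this; exact hbnd)
        (by omega)

theorem aloop_none (s : Array Int) (limit i : Int)
    (hs : (s.size : Int) = limit + 1) (hi : 2 ≤ i) (hil : i ≤ limit)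
    (hnone : ∀ N, ¬ FirstRet s limit i N) :
    ∀ (fuel : Nat), ∀ (j : Nat), ∀ (chain : List Int), ∀ (seen : PySem.Set Int), ∀ (cur : Int),
      cur = it s i j →
      (∀ l : Nat, 1 ≤ l → l ≤ j → i < it s i l ∧ it s i l ≤ limit) →
      findChainLengthLoop s limit i fuel chain seen cur = (0, []) := by
  intro fuel
  induction fuel with
  | zero => intro j chain seen cur _ _; rfl
  | succ fuel ih =>
    intro j chain seen cur hcur hint
    have hcb : 2 ≤ cur ∧ cur ≤ limit := by
      rw [hcur]; exact it_bounds s limit i j hi hil hint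
    have hget : pyAGet s cur 0 = it s i (j + 1) := by
      rw [pyGetD_aliq s limit cur hs (by omega) hcb.2, hcur, ← it_succ]
    simp only [findChainLengthLoop, hget]
    rw [if_neg (by omega)]
    have hne : it s i (j + 1) ≠ i := by
      intro he
      exact hnone (j + 1) ⟨by omega, he,
        fun l hl1 hl2 => hint l hl1 (by omega)⟩
    by_cases h1 : it s i (j + 1) > limit
    · rw [if_pos h1]
    · rw [if_neg h1]
      by_cases h2 : it s i (j + 1) = 0 ∨ it s i (j + 1) = 1
      · rw [if_pos h2]
      · rw [if_neg h2]
        rw [if_neg hne]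
        by_cases h3 : it s i (j + 1) < i
        · rw [if_pos h3]
        · rw [if_neg h3]
          by_cases h4 : PySem.Set.contains seen (it s i (j + 1))
          · rw [if_pos h4]
          · rw [if_neg h4]
            exact ih (j + 1) _ _ _ rfl
              (fun l hl1 hl2 => by
                rcases Nat.lt_or_ge l (j + 1) with h | h
                · exact hint l hl1 (by omega)
                · have : l = j + 1 := by omega
                  subst this
                  constructor
                  · omega
                  · omega)

theorem findChainLength_of_firstRet (s : Array Int) (limit i : Int) (N : Nat)
    (hs : (s.size : Int) = limit + 1) (hi : 2 ≤ i) (hil : i ≤ limit)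
    (hN : FirstRet s limit i N) :
    findChainLength i s limit = ((N : Int), (List.range N).map (it s i)) := by
  unfold findChainLength
  have hle := firstRet_le s limit i N hi hil hN
  exact aloop_found s limit i N hs hi hil hN ((limit + 2).toNat) 0 [i]
    (PySem.Set.ofList [i]) i (by simp [it_zero]) (by rfl) (by rw [it_zero])
    hN.1 (fun l hl1 hl2 => by omega) (by omega)

theorem findChainLength_of_none (s : Array Int) (limit i : Int)
    (hs : (s.size : Int) = limit + 1) (hi : 2 ≤ i) (hil : i ≤ limit)
    (hnone : ∀ N, ¬ FirstRet s limit i N) :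
    findChainLength i s limit = (0, []) := by
  unfold findChainLength
  exact aloop_none s limit i hs hi hil hnone ((limit + 2).toNat) 0 [i]
    (PySem.Set.ofList [i]) i (by rw [it_zero]) (fun l hl1 hl2 => by omega)

-- ===== B's rebuild loop produces the orbit =====

theorem rebuild_loop (s : Array Int) (limit i : Int) (N : Nat)
    (hs : (s.size : Int) = limit + 1) (hi : 2 ≤ i) (hil : i ≤ limit)
    (hN : FirstRet s limit i N) :
    ∀ (m : Nat), m ≤ N →
      (List.range m).foldl (fun st (k : Nat) => rebuildBody s st (k : Int)) ([], i)
        = ((List.range m).map (it s i), it s i m) := by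
  intro m
  induction m with
  | zero => intro _; simp [it_zero]
  | succ m ih =>
    intro hm
    rw [List.range_succ, List.foldl_append, ih (by omega)]
    simp only [List.foldl_cons, List.foldl_nil, rebuildBody]
    have hb : 2 ≤ it s i m ∧ it s i m ≤ limit := by
      apply it_bounds s limit i m hi hil
      intro j hj1 hj2
      exact hN.2.2 j hj1 (by omega)
    simp only [Prod.mk.injEq]
    constructor
    · simp
    · rw [pyGetD_aliq s limit (it s i m) hs (by omega) hb.2, ← it_succ]

theorem rebuild_eq (s : Array Int) (limit i : Int) (N : Nat)
    (hs : (s.size : Int) = limit + 1) (hi : 2 ≤ i) (hil : i ≤ limit)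
    (hN : FirstRet s limit i N) :
    rebuildChain s i (N : Int) = (List.range N).map (it s i) := by
  unfold rebuildChain
  rw [PySem.List.pyRange_zero_natCast, List.foldl_map]
  rw [rebuild_loop s limit i N hs hi hil hN N (le_refl _)]

-- ===== the outer fold =====

theorem outer_fold (s : Array Int) (limit : Int) (hs : (s.size : Int) = limit + 1) :
    ∀ (m : Nat), ∀ (lo : Int), 2 ≤ lo → limit + 1 - lo ≤ (m : Int) →
      ∀ (chains : List (Int × List Int)), ∀ (seen : PySem.Set Int),
      (∀ x ∈ seen, ∃ (mm : Int) (N : Nat) (a : Nat), 2 ≤ mm ∧ mm < lo ∧ mm ≤ limit ∧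
        FirstRet s limit mm N ∧ a < N ∧ x = it s mm a) →
      ((PySem.List.pyRange lo (limit + 1)).foldl (outerBodyA s limit) (chains, seen)).1
        = (PySem.List.pyRange lo (limit + 1)).foldl (outerBodyB s limit) chains := by
  intro m
  induction m with
  | zero =>
    intro lo hlo hm chains seen hseen
    rw [PySem.List.pyRange_one_eq_nil (by omega)]
    rfl
  | succ m ih =>
    intro lo hlo hm chains seen hseen
    by_cases hrange : lo < limit + 1
    · rw [PySem.List.pyRange_one_cons hrange]
      rw [List.foldl_cons, List.foldl_cons]
      have hlim : lo ≤ limit := by omega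
      by_cases hc : PySem.Set.contains seen lo = true
      · -- lo already in a found chain: A skips; B's walk finds no root at lo
        have hmem : lo ∈ seen := (PySem.Set.contains_iff seen lo).mp hc
        obtain ⟨mm, N, a, hmm2, hmmlt, hmml, hFR, haN, hax⟩ := hseen lo hmem
        have hnone : ∀ N', ¬ FirstRet s limit lo N' := by
          rcases Nat.eq_zero_or_pos a with ha0 | hapos
          · subst ha0; rw [it_zero] at hax; omega
          · exact not_firstRet_of_orbit s limit mm lo N a hFR hapos haN hax hmmlt
        have hA : outerBodyA s limit (chains, seen) lo = (chains, seen) := by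
          unfold outerBodyA; rw [if_pos hc]
        have hB : outerBodyB s limit chains lo = chains := by
          unfold outerBodyB
          rw [cycleLength_of_none s limit lo hs hlo hlim hnone]
          simp
        rw [hA, hB]
        exact ih (lo + 1) (by omega) (by push_cast at hm ⊢; omega) chains seen
          (fun x hx => by
            obtain ⟨mm', N', a', h1, h2, h3, h4, h5, h6⟩ := hseen x hx
            exact ⟨mm', N', a', h1, by omega, h3, h4, h5, h6⟩)
      · have hcf : PySem.Set.contains seen lo = false := by
          cases hx : PySem.Set.contains seen lo
          · rfl
          · exact absurd hx hc
        by_cases hex : ∃ N, FirstRet s limit lo N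
        · obtain ⟨N, hN⟩ := hex
          have hA : outerBodyA s limit (chains, seen) lo
              = (chains ++ [((N : Int), (List.range N).map (it s lo))],
                 PySem.Set.update seen ((List.range N).map (it s lo))) := by
            unfold outerBodyA
            rw [if_neg (by rw [hcf]; exact Bool.false_ne_true)]
            rw [findChainLength_of_firstRet s limit lo N hs hlo hlim hN]
            rw [if_pos (by exact_mod_cast Nat.cast_pos.mpr hN.1)]
          have hB : outerBodyB s limit chains lo
              = chains ++ [((N : Int), (List.range N).map (it s lo))] := by
            unfold outerBodyB
            rw [cycleLength_of_firstRet s limit lo N hs hlo hlim hN]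
            rw [if_pos (by exact_mod_cast Nat.cast_pos.mpr hN.1)]
            rw [rebuild_eq s limit lo N hs hlo hlim hN]
          rw [hA, hB]
          exact ih (lo + 1) (by omega) (by push_cast at hm ⊢; omega) _ _
            (fun x hx => by
              rw [PySem.Set.mem_update] at hx
              rcases hx with hx | hx
              · obtain ⟨mm', N', a', h1, h2, h3, h4, h5, h6⟩ := hseen x hx
                exact ⟨mm', N', a', h1, by omega, h3, h4, h5, h6⟩
              · simp only [List.mem_map, List.mem_range] at hx
                obtain ⟨a, haN, hax⟩ := hx
                exact ⟨lo, N, a, hlo, by omega, hlim, hN, haN, hax.symm⟩)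
        · rw [not_exists] at hex
          have hA : outerBodyA s limit (chains, seen) lo = (chains, seen) := by
            unfold outerBodyA
            rw [if_neg (by rw [hcf]; exact Bool.false_ne_true)]
            rw [findChainLength_of_none s limit lo hs hlo hlim hex]
            simp
          have hB : outerBodyB s limit chains lo = chains := by
            unfold outerBodyB
            rw [cycleLength_of_none s limit lo hs hlo hlim hex]
            simp
          rw [hA, hB]
          exact ih (lo + 1) (by omega) (by push_cast at hm ⊢; omega) chains seen
            (fun x hx => by
              obtain ⟨mm', N', a', h1, h2, h3, h4, h5, h6⟩ := hseen x hx
              exact ⟨mm', N', a', h1, by omega, h3, h4, h5, h6⟩)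
    · rw [PySem.List.pyRange_one_eq_nil (by omega)]
      rfl

-- length of the sieve output
theorem size_pyASet (a : Array Int) (i : Int) (v : Int) : (pyASet a i v).size = a.size := by
  unfold pyASet
  split_ifs <;> simp

theorem sieve_inner_len (i : Int) (l : List Int) (ds : Array Int) :
    (l.foldl (fun ds j => pyASet ds j (pyAGet ds j 0 + i)) ds).size = ds.size := by
  induction l generalizing ds with
  | nil => rfl
  | cons x xs ih => simp [List.foldl_cons, ih, size_pyASet]

theorem sieve_outer_len (limit : Int) (l : List Int) (ds : Array Int) :
    (l.foldl (fun ds i => (PySem.List.pyRange (2 * i) (limit + 1) i).foldl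
        (fun ds j => pyASet ds j (pyAGet ds j 0 + i)) ds) ds).size
      = ds.size := by
  induction l generalizing ds with
  | nil => rfl
  | cons x xs ih => rw [List.foldl_cons, ih, sieve_inner_len]

theorem size_computeDivisorSums (limit : Int) :
    (computeDivisorSums limit).size = (limit + 1).toNat := by
  unfold computeDivisorSums
  rw [sieve_outer_len]
  simp

-- ===== VERDICT (by name: the statement is the Claim_ definition above) =====
theorem find_all_amicable_chains_spec : Claim_equal_find_all_amicable_chains := by
  unfold Claim_equal_find_all_amicable_chains Spec_find_all_amicable_chains
  intro limit _
  unfold find_all_amicable_chains find_all_amicable_chains_alt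
  by_cases h2 : limit < 2
  · rw [PySem.List.pyRange_one_eq_nil (by omega)]
    rfl
  · have h2' : 2 ≤ limit := by omega
    have hs : ((computeDivisorSums limit).size : Int) = limit + 1 := by
      rw [size_computeDivisorSums]; omega
    have := outer_fold (computeDivisorSums limit) limit hs (limit - 1).toNat 2
      (by norm_num) (by omega) [] PySem.Set.empty
      (fun x hx => absurd hx (by simp [PySem.Set.empty]))
    simp only at this ⊢
    rw [this]
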